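-- pv_equiv track=rewrite | github.com/lepetitprinz/coding-challenge-auto-push | 프로그래머스/lv2/17677. ［1차］ 뉴스 클러스터링/［1차］ 뉴스 클러스터링.py | make_jaccard_count
-- ===== SOURCE A (Python) =====
-- from collections import Counter
--
-- def make_jaccard_count(string):
--     string = string.lower()
--
--     jaccard_list = []
--     for i in range(len(string)-1):
--         if string[i].isalpha() and string[i+1].isalpha():
--             jaccard_list.append(string[i] + string[i+1])
--     jaccard_cnt = dict(Counter(jaccard_list))
--
--     return jaccard_cnt
-- ===== SOURCE B (Python) =====
-- def make_jaccard_count(string):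
--     s = string.lower()
--     # split into maximal runs of alphabetic characters
--     runs = []
--     cur = []
--     for ch in s:
--         if ch.isalpha():
--             cur.append(ch)
--         else:
--             if cur:
--                 runs.append(cur)
--             cur = []
--     if cur:
--         runs.append(cur)
--     counts = {}
--     for run in runs:
--         for a, b in zip(run, run[1:]):
--             bg = a + b
--             counts[bg] = counts.get(bg, 0) + 1
--     return counts
-- ===== Notes on version B (the rewrite author's own statement) =====
-- stated objective: alternative
-- what changed: Replaces the flat index loop with a both-alpha test at every position by first splitting the lowered string into maximal alphabetic runs and then counting the adjacent bigrams inside each run with a directly-incremented dict instead of Counter.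
import Mathlib
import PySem

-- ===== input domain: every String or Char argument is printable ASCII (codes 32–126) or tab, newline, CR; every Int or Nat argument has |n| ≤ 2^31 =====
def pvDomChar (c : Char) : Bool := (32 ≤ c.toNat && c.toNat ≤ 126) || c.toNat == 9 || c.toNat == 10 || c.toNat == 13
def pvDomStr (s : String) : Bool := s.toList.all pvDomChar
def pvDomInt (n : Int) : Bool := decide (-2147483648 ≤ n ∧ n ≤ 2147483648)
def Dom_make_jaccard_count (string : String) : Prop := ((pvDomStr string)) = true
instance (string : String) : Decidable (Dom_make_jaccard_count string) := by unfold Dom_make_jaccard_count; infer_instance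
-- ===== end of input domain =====

-- B splits the lowered string into maximal alphabetic runs and counts each run's adjacent
-- bigrams with a directly incremented dict, instead of A's flat index loop + Counter;
-- objective: alternative decomposition, same asymptotic cost.

-- ===== PORT A =====
def make_jaccard_count (string : String) : List (String × Int) :=
  let cs := (PySem.Str.lower string).toList
  let jaccard_list := (PySem.List.pyRange 0 ((cs.length : Int) - 1) 1).foldl
      (fun acc i =>
        if PySem.Chars.isalpha (PySem.List.pyGetD cs i ' ')
            && PySem.Chars.isalpha (PySem.List.pyGetD cs (i+1) ' ') then
          acc ++ [String.ofList [PySem.List.pyGetD cs i ' ', PySem.List.pyGetD cs (i+1) ' ']]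
        else acc) []
  (PySem.Dict.counter jaccard_list).items

-- ===== PORT B =====
-- maximal runs of alphabetic characters (cur = run being built, in order)
def pvRuns : List Char → List Char → List (List Char)
  | cur, [] => if cur.isEmpty then [] else [cur]
  | cur, c :: rest =>
      if PySem.Chars.isalpha c then pvRuns (cur ++ [c]) rest
      else (if cur.isEmpty then [] else [cur]) ++ pvRuns [] rest

-- zip(run, run[1:]) bigrams
def pvBigrams (r : List Char) : List String :=
  (r.zip r.tail).map (fun q => String.ofList [q.1, q.2])

def make_jaccard_count_alt (string : String) : List (String × Int) :=
  let cs := (PySem.Str.lower string).toList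
  let runs := pvRuns [] cs
  let counts := runs.foldl
      (fun d r => (pvBigrams r).foldl
        (fun d bg => d.insert bg (d.getD bg 0 + 1)) d)
      PySem.Dict.empty
  counts.items

-- ===== PRECONDITION & SPEC =====
def Spec_make_jaccard_count (string : String) (out : List (String × Int)) : Prop := out = make_jaccard_count_alt string
instance (string : String) (out : List (String × Int)) : Decidable (Spec_make_jaccard_count string out) := by unfold Spec_make_jaccard_count; infer_instance

-- ===== CLAIM (what is proved, stated in full; the proofs are below) =====
def Claim_equal_make_jaccard_count : Prop := ∀ (string : String), Dom_make_jaccard_count string → Spec_make_jaccard_count string (make_jaccard_count string)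

-- ===== LEMMAS AND PROOFS =====

-- adjacent pairs, structurally
def pvAdj : List Char → List (Char × Char)
  | a :: b :: t => (a, b) :: pvAdj (b :: t)
  | _ => []

def pvP (q : Char × Char) : Bool := PySem.Chars.isalpha q.1 && PySem.Chars.isalpha q.2

@[simp] theorem pvAdj_nil : pvAdj [] = [] := rfl
@[simp] theorem pvAdj_single (a : Char) : pvAdj [a] = [] := rfl
@[simp] theorem pvAdj_cons₂ (a b : Char) (t : List Char) :
    pvAdj (a :: b :: t) = (a, b) :: pvAdj (b :: t) := rfl

theorem pvAdj_eq_zip : ∀ cs : List Char, pvAdj cs = cs.zip cs.tail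
  | [] => rfl
  | [_] => rfl
  | a :: b :: t => by simp [pvAdj_eq_zip (b :: t)]

theorem pv_map_pairs (cs : List Char) (d : Char) :
    (PySem.List.pyRange 0 ((cs.length : Int) - 1) 1).map
      (fun i => (PySem.List.pyGetD cs i d, PySem.List.pyGetD cs (i + 1) d))
    = cs.zip cs.tail := by
  apply List.ext_getElem
  · simp [PySem.List.length_pyRange_one]
  · intro k h1 h2
    have hk : k < cs.length - 1 := by
      simp [PySem.List.length_pyRange_one] at h1; omega
    rw [List.getElem_map, PySem.List.getElem_pyRange_one, List.getElem_zip]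
    simp only [zero_add]
    rw [show ((k : Int)) + 1 = (((k + 1 : Nat)) : Int) by push_cast; ring]
    rw [PySem.List.pyGetD_natCast, PySem.List.pyGetD_natCast,
        List.getD_eq_getElem cs d (by omega), List.getD_eq_getElem cs d (by omega)]
    simp [List.getElem_tail]

-- A's loop body as a filter-map of the adjacent pairs
theorem pv_A_list (cs : List Char) :
    (PySem.List.pyRange 0 ((cs.length : Int) - 1) 1).foldl
      (fun acc i =>
        if PySem.Chars.isalpha (PySem.List.pyGetD cs i ' ')
            && PySem.Chars.isalpha (PySem.List.pyGetD cs (i+1) ' ') then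
          acc ++ [String.ofList [PySem.List.pyGetD cs i ' ', PySem.List.pyGetD cs (i+1) ' ']]
        else acc) []
    = (((pvAdj cs).filter pvP).map (fun q => String.ofList [q.1, q.2])) := by
  have h2 : (cs.zip cs.tail).foldl
      (fun acc (q : Char × Char) =>
        if pvP q then acc ++ [String.ofList [q.1, q.2]] else acc) []
      = (PySem.List.pyRange 0 ((cs.length : Int) - 1) 1).foldl
      (fun acc i =>
        if PySem.Chars.isalpha (PySem.List.pyGetD cs i ' ')
            && PySem.Chars.isalpha (PySem.List.pyGetD cs (i+1) ' ') then
          acc ++ [String.ofList [PySem.List.pyGetD cs i ' ', PySem.List.pyGetD cs (i+1) ' ']]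
        else acc) [] := by
    rw [← pv_map_pairs cs ' ', List.foldl_map]
    rfl
  rw [← h2, PySem.List.foldl_append_if, pvAdj_eq_zip]
  simp

theorem pv_filter_all_alpha :
    ∀ cur : List Char, (∀ x ∈ cur, PySem.Chars.isalpha x = true) →
      (pvAdj cur).filter pvP = pvAdj cur
  | [], _ => rfl
  | [_], _ => rfl
  | a :: b :: t, h => by
      have ha : PySem.Chars.isalpha a = true := h a (by simp)
      have hb : PySem.Chars.isalpha b = true := h b (by simp)
      have hr := pv_filter_all_alpha (b :: t) (fun x hx => h x (by simp at hx ⊢; tauto))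
      simp [hr, pvP, ha, hb]

theorem pv_filter_notalpha_head (c : Char) (hc : PySem.Chars.isalpha c = false)
    (rest : List Char) :
    (pvAdj (c :: rest)).filter pvP = (pvAdj rest).filter pvP := by
  cases rest with
  | nil => rfl
  | cons r t => simp [pvP, hc]

theorem pv_filter_split (c : Char) (hc : PySem.Chars.isalpha c = false) (rest : List Char) :
    ∀ cur : List Char, (∀ x ∈ cur, PySem.Chars.isalpha x = true) →
      (pvAdj (cur ++ c :: rest)).filter pvP = pvAdj cur ++ (pvAdj rest).filter pvP
  | [], _ => by simpa using pv_filter_notalpha_head c hc rest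
  | [a], _ => by
      have h1 := pv_filter_notalpha_head c hc rest
      simp only [List.cons_append, List.nil_append, pvAdj_cons₂, List.filter_cons]
      simp [pvP, hc, h1]
  | a :: b :: t, h => by
      have ha : PySem.Chars.isalpha a = true := h a (by simp)
      have hb : PySem.Chars.isalpha b = true := h b (by simp)
      have hr := pv_filter_split c hc rest (b :: t) (fun x hx => h x (by simp at hx ⊢; tauto))
      simp only [List.cons_append] at hr ⊢
      simp [hr, pvP, ha, hb]

theorem pv_runs_flat (cs : List Char) :
    ∀ cur : List Char, (∀ x ∈ cur, PySem.Chars.isalpha x = true) →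
      (pvRuns cur cs).flatMap pvAdj = (pvAdj (cur ++ cs)).filter pvP := by
  induction cs with
  | nil =>
      intro cur h
      rw [List.append_nil, pv_filter_all_alpha cur h]
      cases cur <;> simp [pvRuns]
  | cons c rest ih =>
      intro cur h
      by_cases hc : PySem.Chars.isalpha c = true
      · have hall : ∀ x ∈ cur ++ [c], PySem.Chars.isalpha x = true := by
          intro x hx
          rcases List.mem_append.1 hx with h1 | h1
          · exact h x h1
          · simp at h1; simpa [h1] using hc
        have heq : cur ++ c :: rest = (cur ++ [c]) ++ rest := by simp
        rw [heq, ← ih (cur ++ [c]) hall]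
        simp [pvRuns, hc]
      · have hc' : PySem.Chars.isalpha c = false := by simpa using hc
        have hi := ih [] (by simp)
        rw [List.nil_append] at hi
        rw [pv_filter_split c hc' rest cur h, ← hi]
        cases cur <;> simp [pvRuns, hc']

theorem pv_foldl_flatMap {α β γ : Type} (g : α → List β) (step : γ → β → γ) :
    ∀ (l : List α) (init : γ),
      l.foldl (fun d r => (g r).foldl step d) init = (l.flatMap g).foldl step init
  | [], _ => rfl
  | r :: t, init => by
      simp only [List.foldl_cons, List.flatMap_cons, List.foldl_append]
      exact pv_foldl_flatMap g step t _

theorem pv_main (cs : List Char) :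
    (PySem.Dict.counter ((PySem.List.pyRange 0 ((cs.length : Int) - 1) 1).foldl
      (fun acc i =>
        if PySem.Chars.isalpha (PySem.List.pyGetD cs i ' ')
            && PySem.Chars.isalpha (PySem.List.pyGetD cs (i+1) ' ') then
          acc ++ [String.ofList [PySem.List.pyGetD cs i ' ', PySem.List.pyGetD cs (i+1) ' ']]
        else acc) [])).items
    = ((pvRuns [] cs).foldl
        (fun d r => (pvBigrams r).foldl
          (fun d bg => d.insert bg (d.getD bg 0 + 1)) d)
        PySem.Dict.empty).items := by
  rw [pv_A_list cs, pv_foldl_flatMap pvBigrams _ (pvRuns [] cs) PySem.Dict.empty]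
  have hflat : (pvRuns [] cs).flatMap pvBigrams
      = (((pvAdj cs).filter pvP).map (fun q => String.ofList [q.1, q.2])) := by
    have hfun : pvBigrams = fun r => (pvAdj r).map (fun q => String.ofList [q.1, q.2]) := by
      funext r; simp [pvBigrams, pvAdj_eq_zip]
    rw [hfun, ← List.map_flatMap, pv_runs_flat cs [] (by simp)]
    simp
  rw [hflat, PySem.Dict.foldl_insert_getD_add_one_eq_counter]

-- ===== VERDICT (by name: the statement is the Claim_ definition above) =====
theorem make_jaccard_count_spec : Claim_equal_make_jaccard_count := by
  intro string _
  show make_jaccard_count string = make_jaccard_count_alt string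
  exact pv_main ((PySem.Str.lower string).toList)
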